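-- pv_equiv track=rewrite | github.com/VasylVaskivskyi/biostitch | biostitch/image_positions.py | create_relative_position
-- ===== SOURCE A (Python) =====
-- def assign_rel_pos(array):
--     """arrange images depending on how far they from central image"""
--     try:
--         array[0][0] > 0
--         array[0][0] < 0
--     except IndexError:
--         return []
--
--     if array[0][0] > 0:
--         for i in range(0, len(array)):
--             if array[i][2] > array[i - 1][2]:
--                 array[i][0] += array[i - 1][0]
--             elif array[i][2] == array[i - 1][2]:
--                 array[i][0] = array[i - 1][0]
--     elif array[0][0] < 0:
--         for i in range(len(array) - 1, -1, -1):  # reverse order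
--             if array[i - 1][2] < array[i][2]:
--                 array[i - 1][0] += array[i][0]
--             elif array[i - 1][2] == array[i][2]:
--                 array[i - 1][0] = array[i][0]
--
--     return array
--
-- def create_relative_position(array, center_field):
--     """find central image and sorts other values with respect to center"""
--
--     plus = []   # values displaced in y+ or x+ from center
--     minus = []  # values displaced in y- or x- from center
--     same = []   # values that occupy same place as center (e.g. y0, x1)
--     full_range = []
--     for i in range(0, len(array)):
--         if array[i] > center_field:
--             plus.append([1, i, array[i]])
--         elif array[i] < center_field:
--             minus.append([-1, i, array[i]])
--         else:
--             same.append([0, i, array[i]])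
--
--     # sort by image coordinates from microscope
--     plus.sort(key = lambda x: x[2])
--     minus.sort(key = lambda x: x[2])
--
--     # create relative coordinates for images
--     plus_sorted = assign_rel_pos(plus)
--     minus_sorted = assign_rel_pos(minus)
--
--     # combine all coordinates into one list
--     full_range.extend(minus_sorted)
--     full_range.extend(same)
--     full_range.extend(plus_sorted)
--
--     return full_range
-- ===== SOURCE B (Python) =====
-- def create_relative_position(array, center_field):
--     same = [[0, i, v] for i, v in enumerate(array) if v == center_field]
--     plus = sorted([(i, v) for i, v in enumerate(array) if v > center_field], key=lambda t: t[1])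
--     minus = sorted([(i, v) for i, v in enumerate(array) if v < center_field], key=lambda t: t[1])
--     pvals = sorted(set(v for _, v in plus))
--     mvals = sorted(set(v for _, v in minus))
--     return ([[mvals.index(v) - len(mvals), i, v] for i, v in minus]
--             + same
--             + [[pvals.index(v) + 1, i, v] for i, v in plus])
-- ===== Notes on version B (the rewrite author's own statement) =====
-- stated objective: simpler
-- what changed: A mutates the sorted plus/minus triple lists in place with prefix/suffix accumulation loops (including a negative-index wraparound read at i=0); B instead builds the sorted list of distinct values per bucket and assigns each element its dense rank directly by position in that table (index+1 for plus, index-len for minus), with no in-place mutation.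
import Mathlib
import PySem

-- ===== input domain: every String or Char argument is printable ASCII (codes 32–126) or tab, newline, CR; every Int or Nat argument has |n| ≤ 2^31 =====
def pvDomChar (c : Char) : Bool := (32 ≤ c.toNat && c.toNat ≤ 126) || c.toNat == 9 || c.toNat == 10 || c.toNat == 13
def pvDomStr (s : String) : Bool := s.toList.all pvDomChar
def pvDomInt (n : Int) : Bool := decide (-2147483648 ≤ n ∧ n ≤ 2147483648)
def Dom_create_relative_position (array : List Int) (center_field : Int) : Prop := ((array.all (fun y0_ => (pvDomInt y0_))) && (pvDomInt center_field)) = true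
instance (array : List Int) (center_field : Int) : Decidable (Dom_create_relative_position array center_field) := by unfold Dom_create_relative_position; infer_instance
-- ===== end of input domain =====

-- B replaces A's in-place rank-accumulation loops (with their i=0 wraparound reads) by an
-- explicit distinct-value → dense-rank table (sorted set + index); objective: simpler.

-- ===== PORT A =====
-- body of A's forward loop in assign_rel_pos (the `if array[0][0] > 0` branch)
def arpStep (arr : List (List Int)) (i : Int) : List (List Int) :=
  let cur := PySem.List.pyGetD arr i []
  let prev := PySem.List.pyGetD arr (i - 1) []
  if PySem.List.pyGetD cur 2 0 > PySem.List.pyGetD prev 2 0 then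
    PySem.List.pySetD arr i (PySem.List.pySetD cur 0 (PySem.List.pyGetD cur 0 0 + PySem.List.pyGetD prev 0 0))
  else if PySem.List.pyGetD cur 2 0 = PySem.List.pyGetD prev 2 0 then
    PySem.List.pySetD arr i (PySem.List.pySetD cur 0 (PySem.List.pyGetD prev 0 0))
  else arr

-- body of A's reverse loop in assign_rel_pos (the `elif array[0][0] < 0` branch)
def arnStep (arr : List (List Int)) (i : Int) : List (List Int) :=
  let cur := PySem.List.pyGetD arr i []
  let prev := PySem.List.pyGetD arr (i - 1) []
  if PySem.List.pyGetD prev 2 0 < PySem.List.pyGetD cur 2 0 then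
    PySem.List.pySetD arr (i - 1) (PySem.List.pySetD prev 0 (PySem.List.pyGetD prev 0 0 + PySem.List.pyGetD cur 0 0))
  else if PySem.List.pyGetD prev 2 0 = PySem.List.pyGetD cur 2 0 then
    PySem.List.pySetD arr (i - 1) (PySem.List.pySetD prev 0 (PySem.List.pyGetD cur 0 0))
  else arr

def assign_rel_pos (array : List (List Int)) : List (List Int) :=
  -- `try: array[0][0] … except IndexError: return []`
  match PySem.List.pyGet? array 0 with
  | none => []
  | some t0 =>
    match PySem.List.pyGet? t0 0 with
    | none => []
    | some h =>
      if h > 0 then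
        (PySem.List.pyRange 0 (array.length : Int) 1).foldl arpStep array
      else if h < 0 then
        (PySem.List.pyRange ((array.length : Int) - 1) (-1) (-1)).foldl arnStep array
      else array

def create_relative_position (array : List Int) (center_field : Int) : List (List Int) :=
  let pms := (PySem.List.pyRange 0 (array.length : Int) 1).foldl
    (fun (acc : List (List Int) × List (List Int) × List (List Int)) i =>
      let v := PySem.List.pyGetD array i 0
      if v > center_field then (acc.1 ++ [[1, i, v]], acc.2.1, acc.2.2)
      else if v < center_field then (acc.1, acc.2.1 ++ [[-1, i, v]], acc.2.2)
      else (acc.1, acc.2.1, acc.2.2 ++ [[0, i, v]])) ([], [], [])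
  let plus := PySem.List.sorted pms.1 (fun x => PySem.List.pyGetD x 2 0) false
  let minus := PySem.List.sorted pms.2.1 (fun x => PySem.List.pyGetD x 2 0) false
  let plus_sorted := assign_rel_pos plus
  let minus_sorted := assign_rel_pos minus
  minus_sorted ++ pms.2.2 ++ plus_sorted

-- ===== PORT B =====
def create_relative_position_alt (array : List Int) (center_field : Int) : List (List Int) :=
  let en := PySem.List.enumerate array 0
  let same := (en.filter (fun p => p.2 == center_field)).map (fun p => [0, p.1, p.2])
  let plus := PySem.List.sorted (en.filter (fun p => decide (center_field < p.2))) (fun p => p.2) false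
  let minus := PySem.List.sorted (en.filter (fun p => decide (p.2 < center_field))) (fun p => p.2) false
  let pvals := PySem.List.sorted (PySem.Set.ofList (plus.map (fun p => p.2))) (fun v => v) false
  let mvals := PySem.List.sorted (PySem.Set.ofList (minus.map (fun p => p.2))) (fun v => v) false
  minus.map (fun p => [(((PySem.List.index? mvals p.2).getD 0 : Nat) : Int) - (mvals.length : Int), p.1, p.2])
    ++ same
    ++ plus.map (fun p => [(((PySem.List.index? pvals p.2).getD 0 : Nat) : Int) + 1, p.1, p.2])

-- ===== PRECONDITION & SPEC =====
def Spec_create_relative_position (array : List Int) (center_field : Int) (out : List (List Int)) : Prop := out = create_relative_position_alt array center_field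
instance (array : List Int) (center_field : Int) (out : List (List Int)) : Decidable (Spec_create_relative_position array center_field out) := by unfold Spec_create_relative_position; infer_instance

-- ===== CLAIM (what is proved, stated in full; the proofs are below) =====
def Claim_equal_create_relative_position : Prop := ∀ (array : List Int) (center_field : Int), Dom_create_relative_position array center_field → Spec_create_relative_position array center_field (create_relative_position array center_field)

-- ===== LEMMAS AND PROOFS =====

-- dense ranks computed by A's forward loop, as a scan (state = last written rank and value)
def scanP (r v : Int) : List (Int × Int) → List (List Int)
  | [] => []
  | p :: t =>
    let r' := if v < p.2 then 1 + r else if p.2 = v then r else 1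
    [r', p.1, p.2] :: scanP r' p.2 t

-- dense ranks computed by A's reverse loop, as a scan over the reversed list
def scanM (r v : Int) : List (Int × Int) → List (List Int)
  | [] => []
  | p :: t =>
    let r' := if p.2 < v then r - 1 else if p.2 = v then r else -1
    [r', p.1, p.2] :: scanM r' p.2 t

-- number of distinct values below / above v
def rankP (vs : List Int) (v : Int) : Int := ((PySem.Set.ofList vs).countP (fun w => decide (w < v)) : Int)
def rankM (vs : List Int) (v : Int) : Int := ((PySem.Set.ofList vs).countP (fun w => decide (v < w)) : Int)

lemma countP_le_split (l : List Int) (v : Int) :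
    l.countP (fun w => decide (w ≤ v)) = l.countP (fun w => decide (w < v)) + l.count v := by
  induction l with
  | nil => simp
  | cons a t ih =>
    simp only [List.countP_cons, List.count_cons, ih]
    rcases lt_trichotomy a v with h | h | h
    · simp [h, h.le, h.ne]; omega
    · simp [h]; omega
    · simp [not_lt.2 h.le, not_le.2 h, h.ne']

lemma countP_ge_split (l : List Int) (v : Int) :
    l.countP (fun w => decide (v ≤ w)) = l.countP (fun w => decide (v < w)) + l.count v := by
  induction l with
  | nil => simp
  | cons a t ih =>
    simp only [List.countP_cons, List.count_cons, ih]
    rcases lt_trichotomy v a with h | h | h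
    · simp [h, h.le, h.ne']; omega
    · simp [h]; omega
    · simp [not_lt.2 h.le, not_le.2 h, h.ne]

lemma count_ofList_eq_one {vs : List Int} {v : Int} (hv : v ∈ vs) :
    (PySem.Set.ofList vs).count v = 1 :=
  List.count_eq_one_of_mem (PySem.Set.nodup_ofList vs) ((PySem.Set.mem_ofList vs v).2 hv)

lemma idx_strict : ∀ (l : List Int), l.Pairwise (· < ·) → ∀ v ∈ l,
    (PySem.List.index? l v).getD 0 = l.countP (fun w => decide (w < v)) := by
  intro l
  induction l with
  | nil => simp
  | cons a t ih =>
    intro hp v hv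
    rcases List.pairwise_cons.1 hp with ⟨ha, ht⟩
    by_cases hav : a = v
    · subst hav
      rw [PySem.List.index?_cons_self]
      have : t.countP (fun w => decide (w < a)) = 0 :=
        List.countP_eq_zero.2 (fun w hw => by simp [not_lt.2 (ha w hw).le])
      simp [this]
    · have hvt : v ∈ t := by cases hv with | head => exact absurd rfl hav | tail _ h => exact h
      rw [PySem.List.index?_cons_of_ne t hav]
      have hsome : (PySem.List.index? t v).isSome := (PySem.List.index?_isSome_iff t v).2 hvt
      obtain ⟨k, hk⟩ := Option.isSome_iff_exists.1 hsome
      rw [hk]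
      have := ih ht v hvt
      rw [hk] at this
      simp only [Option.map_some, Option.getD_some] at this ⊢
      have hva : a < v := ha v hvt
      simp [hva, ← this]

lemma alt_rankP (vs : List Int) (v : Int) (hv : v ∈ vs) :
    (((PySem.List.index? (PySem.List.sorted (PySem.Set.ofList vs) (fun v => v) false) v).getD 0 : Nat) : Int) + 1
    = 1 + rankP vs v := by
  have hlt := PySem.List.sorted_ofList_pairwise_lt vs
  have hmem : v ∈ PySem.List.sorted (PySem.Set.ofList vs) (fun v => v) false := by
    rw [PySem.List.mem_sorted]; exact (PySem.Set.mem_ofList vs v).2 hv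
  rw [idx_strict _ hlt v hmem,
      (PySem.List.sorted_perm (PySem.Set.ofList vs) (fun v => v) false).countP_eq]
  unfold rankP; ring

lemma alt_rankM (vs : List Int) (v : Int) (hv : v ∈ vs) :
    (((PySem.List.index? (PySem.List.sorted (PySem.Set.ofList vs) (fun v => v) false) v).getD 0 : Nat) : Int)
      - ((PySem.List.sorted (PySem.Set.ofList vs) (fun v => v) false).length : Int)
    = -1 - rankM vs v := by
  have hlt := PySem.List.sorted_ofList_pairwise_lt vs
  have hmem : v ∈ PySem.List.sorted (PySem.Set.ofList vs) (fun v => v) false := by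
    rw [PySem.List.mem_sorted]; exact (PySem.Set.mem_ofList vs v).2 hv
  have hperm := PySem.List.sorted_perm (PySem.Set.ofList vs) (fun v => v) false
  rw [idx_strict _ hlt v hmem, hperm.countP_eq, hperm.length_eq]
  have hsplit : (PySem.Set.ofList vs).length = (PySem.Set.ofList vs).countP (fun w => decide (w < v))
      + (PySem.Set.ofList vs).countP (fun w => decide ¬(decide (w < v) = true)) :=
    List.length_eq_countP_add_countP _
  have hcong : (PySem.Set.ofList vs).countP (fun w => decide ¬(decide (w < v) = true))
      = (PySem.Set.ofList vs).countP (fun w => decide (v ≤ w)) := by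
    apply List.countP_congr; intro w _; simp [not_lt]
  rw [hcong, countP_ge_split, count_ofList_eq_one hv] at hsplit
  unfold rankM; omega

lemma foldl_idx {β : Type} (g : β → Int → Int → β) (full : List Int) :
    ∀ (n : Nat) (k : Nat) (acc : β), full.length - k ≤ n →
    (PySem.List.pyRange (k : Int) (full.length : Int) 1).foldl
      (fun a i => g a i (PySem.List.pyGetD full i 0)) acc
    = (PySem.List.enumerate (full.drop k) (k : Int)).foldl (fun a p => g a p.1 p.2) acc := by
  intro n
  induction n with
  | zero =>
    intro k acc h
    have hk : full.length ≤ k := by omega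
    rw [PySem.List.pyRange_one_eq_nil (by exact_mod_cast hk), List.drop_eq_nil_of_le hk]
    simp [PySem.List.enumerate]
  | succ n ih =>
    intro k acc h
    by_cases hk : k < full.length
    · rw [PySem.List.pyRange_one_cons (by exact_mod_cast hk), List.drop_eq_getElem_cons hk,
        PySem.List.enumerate_cons]
      simp only [List.foldl_cons]
      have hcast : ((k : Int) + 1) = ((k + 1 : Nat) : Int) := by push_cast; ring
      rw [hcast, ih (k + 1) _ (by omega)]
      have hget : PySem.List.pyGetD full (k : Int) 0 = full[k] := by
        rw [PySem.List.pyGetD_natCast, List.getD_eq_getElem?_getD, List.getElem?_eq_getElem hk]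
        rfl
      rw [hget]
    · have hk' : full.length ≤ k := by omega
      rw [PySem.List.pyRange_one_eq_nil (by exact_mod_cast hk'), List.drop_eq_nil_of_le hk']
      simp [PySem.List.enumerate]

lemma part_split (c : Int) : ∀ (l : List (Int × Int)) (P M S : List (List Int)),
    l.foldl (fun (acc : List (List Int) × List (List Int) × List (List Int)) p =>
      if p.2 > c then (acc.1 ++ [[1, p.1, p.2]], acc.2.1, acc.2.2)
      else if p.2 < c then (acc.1, acc.2.1 ++ [[-1, p.1, p.2]], acc.2.2)
      else (acc.1, acc.2.1, acc.2.2 ++ [[0, p.1, p.2]])) (P, M, S)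
    = (P ++ (l.filter (fun p => decide (c < p.2))).map (fun p => [1, p.1, p.2]),
       M ++ (l.filter (fun p => decide (p.2 < c))).map (fun p => [-1, p.1, p.2]),
       S ++ (l.filter (fun p => p.2 == c)).map (fun p => [0, p.1, p.2])) := by
  intro l
  induction l with
  | nil => intro P M S; simp
  | cons p t ih =>
    intro P M S
    simp only [List.foldl_cons, List.filter_cons]
    rcases lt_trichotomy p.2 c with h | h | h
    · have h1 : ¬ (p.2 > c) := by omega
      rw [if_neg h1, if_pos h, ih]
      simp [h, h1, h.ne]
    · rw [if_neg (by omega), if_neg (by omega), ih]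
      simp [h]
    · rw [if_pos h, ih]
      simp [h, not_lt.2 h.le, h.ne']

lemma insertBy_map {α β : Type} (f : α → β) (ba : α → α → Bool) (bb : β → β → Bool)
    (h : ∀ a a', bb (f a) (f a') = ba a a') (x : α) :
    ∀ l : List α, PySem.List.insertBy bb (f x) (l.map f) = (PySem.List.insertBy ba x l).map f := by
  intro l
  induction l with
  | nil => simp [PySem.List.insertBy]
  | cons y ys ih =>
    simp only [List.map_cons, PySem.List.insertBy, h]
    by_cases hb : ba x y
    · simp [hb]
    · simp [hb, ih]

lemma sorted_map {α β : Type} (f : α → β) (kb : β → Int) (ka : α → Int)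
    (h : ∀ a, kb (f a) = ka a) (l : List α) :
    PySem.List.sorted (l.map f) kb false = (PySem.List.sorted l ka false).map f := by
  rw [PySem.List.sorted_eq_foldl_insertBy (l.map f) kb, PySem.List.sorted_eq_foldl_insertBy l ka]
  rw [List.foldl_map]
  have key : ∀ (l' : List α) (acc : List α),
      l'.foldl (fun acc x => PySem.List.insertBy (fun a b => decide (kb a < kb b)) (f x) acc) (acc.map f)
      = (l'.foldl (fun acc x => PySem.List.insertBy (fun a b => decide (ka a < ka b)) x acc) acc).map f := by
    intro l'
    induction l' with
    | nil => intro acc; simp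
    | cons z zs ih =>
      intro acc
      simp only [List.foldl_cons]
      rw [insertBy_map f (fun a b => decide (ka a < ka b)) (fun a b => decide (kb a < kb b)) (by intro a a'; simp [h]) z acc]
      exact ih _
  simpa using key l []

lemma rankP_step (fvs bvs : List Int) (pv v : Int)
    (h : (fvs ++ pv :: v :: bvs).Pairwise (· ≤ ·)) (hlt : pv < v) :
    rankP (fvs ++ pv :: v :: bvs) v = rankP (fvs ++ pv :: v :: bvs) pv + 1 := by
  rcases List.pairwise_append.1 h with ⟨h1, h2, h3⟩
  have hsplit : ∀ w ∈ fvs ++ pv :: v :: bvs, w ≤ pv ∨ v ≤ w := by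
    intro w hw
    rcases List.mem_append.1 hw with hw | hw
    · exact Or.inl (h3 w hw pv (by simp))
    · rcases hw with _ | ⟨_, hw⟩
      · exact Or.inl le_rfl
      · rcases hw with _ | ⟨_, hw⟩
        · exact Or.inr le_rfl
        · exact Or.inr ((List.pairwise_cons.1 (List.pairwise_cons.1 h2).2).1 w hw)
  have hcong : (PySem.Set.ofList (fvs ++ pv :: v :: bvs)).countP (fun w => decide (w < v))
      = (PySem.Set.ofList (fvs ++ pv :: v :: bvs)).countP (fun w => decide (w ≤ pv)) := by
    apply List.countP_congr
    intro w hw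
    rcases hsplit w ((PySem.Set.mem_ofList _ _).1 hw) with hc | hc
    · simp [hc, lt_of_le_of_lt hc hlt]
    · simp [not_lt.2 hc, not_le.2 (lt_of_lt_of_le hlt hc)]
  unfold rankP
  rw [hcong, countP_le_split, count_ofList_eq_one (by simp)]
  push_cast; ring

lemma rankM_step (fvs bvs : List Int) (v pv : Int)
    (h : (fvs ++ v :: pv :: bvs).Pairwise (· ≤ ·)) (hlt : v < pv) :
    rankM (fvs ++ v :: pv :: bvs) v = rankM (fvs ++ v :: pv :: bvs) pv + 1 := by
  rcases List.pairwise_append.1 h with ⟨h1, h2, h3⟩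
  have hsplit : ∀ w ∈ fvs ++ v :: pv :: bvs, w ≤ v ∨ pv ≤ w := by
    intro w hw
    rcases List.mem_append.1 hw with hw | hw
    · exact Or.inl (h3 w hw v (by simp))
    · rcases hw with _ | ⟨_, hw⟩
      · exact Or.inl le_rfl
      · rcases hw with _ | ⟨_, hw⟩
        · exact Or.inr le_rfl
        · exact Or.inr ((List.pairwise_cons.1 (List.pairwise_cons.1 h2).2).1 w hw)
  have hcong : (PySem.Set.ofList (fvs ++ v :: pv :: bvs)).countP (fun w => decide (v < w))
      = (PySem.Set.ofList (fvs ++ v :: pv :: bvs)).countP (fun w => decide (pv ≤ w)) := by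
    apply List.countP_congr
    intro w hw
    rcases hsplit w ((PySem.Set.mem_ofList _ _).1 hw) with hc | hc
    · simp [not_lt.2 hc, not_le.2 (lt_of_le_of_lt hc hlt)]
    · simp [lt_of_lt_of_le hlt hc, hc]
  unfold rankM
  rw [hcong, countP_ge_split, count_ofList_eq_one (by simp)]
  push_cast; ring

lemma scanP_spec : ∀ (todo : List (Int × Int)) (fvs : List Int) (pv : Int),
    (fvs ++ pv :: todo.map (·.2)).Pairwise (· ≤ ·) →
    scanP (1 + rankP (fvs ++ pv :: todo.map (·.2)) pv) pv todo
    = todo.map (fun p => [1 + rankP (fvs ++ pv :: todo.map (·.2)) p.2, p.1, p.2]) := by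
  intro todo
  induction todo with
  | nil => intro fvs pv h; simp [scanP]
  | cons p t ih =>
    intro fvs pv h
    have hmap : (p :: t).map (·.2) = p.2 :: t.map (·.2) := rfl
    rw [hmap] at h ⊢
    have hle : pv ≤ p.2 := by
      rcases List.pairwise_append.1 h with ⟨_, h2, _⟩
      exact (List.pairwise_cons.1 h2).1 p.2 (by simp)
    have hVS : (fvs ++ pv :: p.2 :: t.map (·.2)) = ((fvs ++ [pv]) ++ p.2 :: t.map (·.2)) := by simp
    have hpair' : ((fvs ++ [pv]) ++ p.2 :: t.map (·.2)).Pairwise (· ≤ ·) := by rw [← hVS]; exact h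
    have ih' := ih (fvs ++ [pv]) p.2 hpair'
    rcases eq_or_lt_of_le hle with heq | hlt
    · simp only [scanP, List.map_cons]
      rw [if_neg (by omega : ¬ pv < p.2), if_pos heq.symm]
      refine List.cons_eq_cons.2 ⟨by rw [heq], ?_⟩
      rw [hVS]
      have hr : rankP (fvs ++ [pv] ++ p.2 :: t.map (·.2)) pv
          = rankP (fvs ++ [pv] ++ p.2 :: t.map (·.2)) p.2 := by rw [heq]
      rw [hr]
      exact ih'
    · have hstep := rankP_step fvs (t.map (·.2)) pv p.2 h hlt
      simp only [scanP, List.map_cons]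
      rw [if_pos hlt]
      refine List.cons_eq_cons.2 ⟨by rw [hstep]; ring_nf, ?_⟩
      have harg : 1 + (1 + rankP (fvs ++ pv :: p.2 :: t.map (·.2)) pv)
          = 1 + rankP (fvs ++ pv :: p.2 :: t.map (·.2)) p.2 := by omega
      rw [harg, hVS]
      exact ih'

lemma scanM_spec : ∀ (rev : List (Int × Int)) (bvs : List Int) (pv : Int),
    (rev.reverse.map (·.2) ++ pv :: bvs).Pairwise (· ≤ ·) →
    scanM (-1 - rankM (rev.reverse.map (·.2) ++ pv :: bvs) pv) pv rev
    = rev.map (fun p => [-1 - rankM (rev.reverse.map (·.2) ++ pv :: bvs) p.2, p.1, p.2]) := by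
  intro rev
  induction rev with
  | nil => intro bvs pv h; simp [scanM]
  | cons p t ih =>
    intro bvs pv h
    have hVS : ((p :: t).reverse.map (·.2) ++ pv :: bvs)
        = (t.reverse.map (·.2) ++ p.2 :: pv :: bvs) := by simp
    rw [hVS] at h ⊢
    have hle : p.2 ≤ pv := by
      rcases List.pairwise_append.1 h with ⟨_, h2, _⟩
      exact (List.pairwise_cons.1 h2).1 pv (by simp)
    have ih' := ih (pv :: bvs) p.2 h
    rcases eq_or_lt_of_le hle with heq | hlt
    · simp only [scanM, List.map_cons]
      rw [if_neg (by omega : ¬ p.2 < pv), if_pos heq]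
      refine List.cons_eq_cons.2 ⟨by rw [heq], ?_⟩
      have hr : rankM (t.reverse.map (·.2) ++ p.2 :: pv :: bvs) pv
          = rankM (t.reverse.map (·.2) ++ p.2 :: pv :: bvs) p.2 := by rw [heq]
      rw [hr]
      exact ih'
    · have hstep := rankM_step (t.reverse.map (·.2)) bvs p.2 pv h hlt
      simp only [scanM, List.map_cons]
      rw [if_pos hlt]
      refine List.cons_eq_cons.2 ⟨by rw [hstep]; ring_nf, ?_⟩
      have harg : -1 - rankM (t.reverse.map (·.2) ++ p.2 :: pv :: bvs) pv - 1
          = -1 - rankM (t.reverse.map (·.2) ++ p.2 :: pv :: bvs) p.2 := by omega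
      rw [harg]
      exact ih'

lemma loopP_struct : ∀ (todo : List (Int × Int)) (pre' : List (List Int)) (r iv pv : Int),
    (PySem.List.pyRange ((pre'.length : Int) + 1) ((pre'.length : Int) + 1 + (todo.length : Int)) 1).foldl
      arpStep ((pre' ++ [[r, iv, pv]]) ++ todo.map (fun p => [1, p.1, p.2]))
    = (pre' ++ [[r, iv, pv]]) ++ scanP r pv todo := by
  intro todo
  induction todo with
  | nil =>
    intro pre' r iv pv
    rw [PySem.List.pyRange_one_eq_nil (by simp)]
    simp [scanP]
  | cons p t ih =>
    intro pre' r iv pv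
    set A0 := pre' ++ [[r, iv, pv]] with hA0
    have hA0len : A0.length = pre'.length + 1 := by simp [hA0]
    set k : Nat := pre'.length + 1 with hk
    have hkc : (pre'.length : Int) + 1 = (k : Int) := by rw [hk]; push_cast; ring
    rw [hkc, PySem.List.pyRange_one_cons (by
      have h0 : (0:Int) < ((p :: t).length : Int) := by exact_mod_cast t.length.succ_pos
      linarith)]
    simp only [List.foldl_cons]
    -- evaluate the step at index k
    have hcur : PySem.List.pyGetD (A0 ++ (p :: t).map (fun p => [1, p.1, p.2])) (k : Int) []
        = [1, p.1, p.2] := by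
      rw [PySem.List.pyGetD_natCast, List.getD_eq_getElem?_getD,
        List.getElem?_append_right (by omega), hA0len]
      simp
    have hprevc : ((k : Int) - 1) = ((pre'.length : Nat) : Int) := by rw [hk]; push_cast; ring
    have hprev : PySem.List.pyGetD (A0 ++ (p :: t).map (fun p => [1, p.1, p.2])) ((k : Int) - 1) []
        = [r, iv, pv] := by
      rw [hprevc, PySem.List.pyGetD_natCast, List.getD_eq_getElem?_getD,
        List.getElem?_append_left (by omega), hA0,
        List.getElem?_append_right (by simp)]
      simp
    have hset : ∀ x : List Int, PySem.List.pySetD (A0 ++ (p :: t).map (fun p => [1, p.1, p.2])) (k : Int) x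
        = A0 ++ x :: t.map (fun p => [1, p.1, p.2]) := by
      intro x
      rw [PySem.List.pySetD_natCast, List.set_append_right _ _ (by omega), hA0len]
      simp
    have e5 : ∀ x : Int, PySem.List.pySetD [1, p.1, p.2] 0 x = [x, p.1, p.2] := fun _ => rfl
    have hstep : arpStep (A0 ++ (p :: t).map (fun p => [1, p.1, p.2])) (k : Int)
        = A0 ++ ([if pv < p.2 then 1 + r else if p.2 = pv then r else 1, p.1, p.2] :
            List Int) :: t.map (fun p => [1, p.1, p.2]) := by
      unfold arpStep
      rw [hcur, hprev]
      dsimp only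
      have e1 : PySem.List.pyGetD [1, p.1, p.2] 2 0 = p.2 := rfl
      have e2 : PySem.List.pyGetD [r, iv, pv] 2 0 = pv := rfl
      have e3 : PySem.List.pyGetD [1, p.1, p.2] 0 0 = 1 := rfl
      have e4 : PySem.List.pyGetD [r, iv, pv] 0 0 = r := rfl
      rw [e1, e2, e3, e4]
      simp only [gt_iff_lt]
      split_ifs with h1 h2
      · rw [e5, hset]
      · rw [e5, hset]
      · simp
    rw [hstep]
    have hstart : (k : Int) + 1 = (A0.length : Int) + 1 := by rw [hA0len]
    have hend : (k : Int) + ((p :: t).length : Int) = ((A0.length : Int) + 1) + (t.length : Int) := by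
      rw [hA0len]; simp; ring
    rw [hstart, hend]
    have hassoc : A0 ++ ([if pv < p.2 then 1 + r else if p.2 = pv then r else 1, p.1, p.2] :
          List Int) :: t.map (fun p => [1, p.1, p.2])
        = (A0 ++ [[if pv < p.2 then 1 + r else if p.2 = pv then r else 1, p.1, p.2]]) ++
          t.map (fun p => [1, p.1, p.2]) := by simp
    rw [hassoc, ih]
    simp [scanP]

lemma loopM_struct : ∀ (rev : List (Int × Int)) (done : List (List Int)) (r iv pv : Int),
    (PySem.List.pyRange ((rev.length : Int)) 0 (-1)).foldl
      arnStep (rev.reverse.map (fun p => [-1, p.1, p.2]) ++ ([r, iv, pv] :: done))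
    = (scanM r pv rev).reverse ++ ([r, iv, pv] :: done) := by
  intro rev
  induction rev with
  | nil =>
    intro done r iv pv
    rw [PySem.List.pyRange_neg_one_eq_nil (by simp)]
    simp [scanM]
  | cons p t ih =>
    intro done r iv pv
    have hlen : (((p :: t).length : Nat) : Int) = ((t.length : Int) + 1) := by simp
    rw [hlen, PySem.List.pyRange_neg_one_cons (by positivity)]
    simp only [List.foldl_cons]
    set L1 : List (List Int) := t.reverse.map (fun p => [-1, p.1, p.2]) ++ [[-1, p.1, p.2]] with hL1
    have harr : (p :: t).reverse.map (fun p => [-1, p.1, p.2]) ++ ([r, iv, pv] :: done)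
        = L1 ++ ([r, iv, pv] :: done) := by simp [hL1]
    have hL1len : L1.length = t.length + 1 := by simp [hL1]
    have hidx : (t.length : Int) + 1 = ((t.length + 1 : Nat) : Int) := by push_cast; ring
    have hcur : PySem.List.pyGetD (L1 ++ ([r, iv, pv] :: done)) ((t.length : Int) + 1) []
        = [r, iv, pv] := by
      rw [hidx, PySem.List.pyGetD_natCast, List.getD_eq_getElem?_getD,
        List.getElem?_append_right (by omega), hL1len]
      simp
    have hprevc : ((t.length : Int) + 1 - 1) = ((t.length : Nat) : Int) := by ring
    have hprev : PySem.List.pyGetD (L1 ++ ([r, iv, pv] :: done)) ((t.length : Int) + 1 - 1) []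
        = [-1, p.1, p.2] := by
      rw [hprevc, PySem.List.pyGetD_natCast, List.getD_eq_getElem?_getD,
        List.getElem?_append_left (by omega), hL1,
        List.getElem?_append_right (by simp)]
      simp
    have hset : ∀ x : List Int, PySem.List.pySetD (L1 ++ ([r, iv, pv] :: done)) ((t.length : Int) + 1 - 1) x
        = t.reverse.map (fun p => [-1, p.1, p.2]) ++ (x :: [r, iv, pv] :: done) := by
      intro x
      rw [hprevc, PySem.List.pySetD_natCast,
        List.set_append_left _ _ (by omega), hL1,
        List.set_append_right _ _ (by simp)]
      simp
    have e5 : ∀ x : Int, PySem.List.pySetD [-1, p.1, p.2] 0 x = [x, p.1, p.2] := fun _ => rfl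
    have hstep : arnStep (L1 ++ ([r, iv, pv] :: done)) ((t.length : Int) + 1)
        = t.reverse.map (fun p => [-1, p.1, p.2])
          ++ (([if p.2 < pv then r - 1 else if p.2 = pv then r else -1, p.1, p.2] : List Int)
            :: [r, iv, pv] :: done) := by
      unfold arnStep
      rw [hcur, hprev]
      dsimp only
      have e1 : PySem.List.pyGetD [-1, p.1, p.2] 2 0 = p.2 := rfl
      have e2 : PySem.List.pyGetD [r, iv, pv] 2 0 = pv := rfl
      have e3 : PySem.List.pyGetD [-1, p.1, p.2] 0 0 = -1 := rfl
      have e4 : PySem.List.pyGetD [r, iv, pv] 0 0 = r := rfl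
      rw [e1, e2, e3, e4]
      split_ifs with h1 h2
      · rw [e5, hset]
        have : (-1 : Int) + r = r - 1 := by ring
        rw [this]
      · rw [e5, hset]
      · rw [harr.symm]
        simp
    rw [harr, hstep]
    have hback : t.reverse.map (fun p => [-1, p.1, p.2])
          ++ (([if p.2 < pv then r - 1 else if p.2 = pv then r else -1, p.1, p.2] : List Int)
            :: [r, iv, pv] :: done)
        = t.reverse.map (fun p => [-1, p.1, p.2])
          ++ (([if p.2 < pv then r - 1 else if p.2 = pv then r else -1, p.1, p.2] : List Int)
            :: ([r, iv, pv] :: done)) := rfl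
    have hrange : (t.length : Int) + 1 - 1 = ((t.length : Nat) : Int) := by ring
    rw [hrange, ih ([r, iv, pv] :: done)]
    simp [scanM]

lemma pySetD_concat_neg_one (xs : List (List Int)) (a v : List Int) :
    PySem.List.pySetD (xs ++ [a]) (-1) v = xs ++ [v] := by
  simp [PySem.List.pySetD, PySem.List.pySet?, PySem.List.pyIdx?]

lemma range_neg_split (a : Int) (ha : 0 ≤ a) :
    PySem.List.pyRange a (-1) (-1) = PySem.List.pyRange a 0 (-1) ++ [0] := by
  rw [PySem.List.pyRange_neg_one_eq_reverse a (-1), PySem.List.pyRange_neg_one_eq_reverse a 0]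
  rw [show (-1 : Int) + 1 = 0 by ring, show (0 : Int) + 1 = 1 by ring]
  rw [PySem.List.pyRange_one_cons (by omega : (0 : Int) < a + 1)]
  simp

lemma plus_side (l : List (Int × Int)) (hs : l.Pairwise (fun a b => a.2 ≤ b.2)) :
    assign_rel_pos (l.map (fun p => [1, p.1, p.2]))
    = l.map (fun p => [1 + rankP (l.map (·.2)) p.2, p.1, p.2]) := by
  cases l with
  | nil => rfl
  | cons p0 rest =>
    have hle : ∀ y ∈ p0 :: rest, p0.2 ≤ y.2 := by
      intro y hy
      rcases hy with _ | ⟨_, hy⟩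
      · exact le_rfl
      · exact (List.pairwise_cons.1 hs).1 y hy
    have hr0 : rankP ((p0 :: rest).map (·.2)) p0.2 = 0 := by
      unfold rankP
      rw [List.countP_eq_zero.2]
      · rfl
      · intro w hw
        rcases List.mem_map.1 ((PySem.Set.mem_ofList _ _).1 hw) with ⟨y, hy, rfl⟩
        simp [not_lt.2 (hle y hy)]
    unfold assign_rel_pos
    have h1 : PySem.List.pyGet? ((p0 :: rest).map (fun p => [1, p.1, p.2])) 0
        = some [1, p0.1, p0.2] := by
      rw [show (0 : Int) = ((0 : Nat) : Int) by norm_num, PySem.List.pyGet?_natCast]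
      rfl
    rw [h1]
    dsimp only
    have h2 : PySem.List.pyGet? [1, p0.1, p0.2] 0 = some 1 := rfl
    rw [h2]
    dsimp only
    rw [if_pos (by norm_num : (1 : Int) > 0)]
    -- split off index 0
    have hlen : ((((p0 :: rest).map (fun p => [1, p.1, p.2])).length : Nat) : Int)
        = (rest.length : Int) + 1 := by simp
    rw [hlen, PySem.List.pyRange_one_cons (by positivity)]
    simp only [List.foldl_cons]
    -- the index-0 step is the identity
    have hq : ((p0 :: rest).map (fun p => [1, p.1, p.2])).getLast (by simp)
        = [1, ((p0 :: rest).getLast (by simp)).1, ((p0 :: rest).getLast (by simp)).2] :=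
      List.getLast_map _
    have hstep0 : arpStep ((p0 :: rest).map (fun p => [1, p.1, p.2])) 0
        = (p0 :: rest).map (fun p => [1, p.1, p.2]) := by
      unfold arpStep
      dsimp only
      rw [show ((0 : Int) - 1) = -1 by ring, PySem.List.pyGetD_neg_one _ _ (by simp)]
      have hc : PySem.List.pyGetD ((p0 :: rest).map (fun p => [1, p.1, p.2])) 0 []
          = [1, p0.1, p0.2] := by rw [List.map_cons, PySem.List.pyGetD_zero_cons]
      simp only [hc, hq]
      have e1 : PySem.List.pyGetD [1, p0.1, p0.2] 2 0 = p0.2 := rfl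
      have e2 : ∀ a b : Int, PySem.List.pyGetD [1, a, b] 2 0 = b := fun _ _ => rfl
      have e4 : ∀ a b : Int, PySem.List.pyGetD [1, a, b] 0 0 = 1 := fun _ _ => rfl
      rw [e1, e2, e4]
      have hql : p0.2 ≤ ((p0 :: rest).getLast (by simp)).2 :=
        hle _ (List.getLast_mem _)
      rw [if_neg (by omega)]
      split_ifs with h2'
      · rw [e4, show PySem.List.pySetD [1, p0.1, p0.2] 0 (1 : Int) = [1, p0.1, p0.2] from rfl,
          PySem.List.pySetD_of_nonneg _ _ (by norm_num)]
        simp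
      · rfl
    rw [hstep0]
    have hsh3 : (p0 :: rest).map (fun p => [1, p.1, p.2])
        = (([] : List (List Int)) ++ [[1, p0.1, p0.2]]) ++ rest.map (fun p => [1, p.1, p.2]) := by
      simp
    have hsh1 : (0 : Int) + 1 = ((([] : List (List Int)).length : Int) + 1) := by simp
    have hsh2 : ((rest.length : Int) + 1 : Int)
        = ((([] : List (List Int)).length : Int) + 1 + (rest.length : Int)) := by simp; ring
    rw [hsh3, hsh2, hsh1, loopP_struct rest [] 1 p0.1 p0.2]
    have hpair : (([] : List Int) ++ p0.2 :: rest.map (·.2)).Pairwise (· ≤ ·) := by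
      simpa using List.pairwise_map.mpr hs
    have hspec := scanP_spec rest [] p0.2 hpair
    have hVS : ([] : List Int) ++ p0.2 :: rest.map (·.2) = (p0 :: rest).map (·.2) := by simp
    rw [hVS] at hspec
    rw [hr0] at hspec
    norm_num at hspec
    simp [hspec]
    simpa using hr0

lemma minus_side (l : List (Int × Int)) (hs : l.Pairwise (fun a b => a.2 ≤ b.2)) :
    assign_rel_pos (l.map (fun p => [-1, p.1, p.2]))
    = l.map (fun p => [-1 - rankM (l.map (·.2)) p.2, p.1, p.2]) := by
  rcases List.eq_nil_or_concat l with rfl | ⟨init, plast, rfl⟩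
  · rfl
  · simp only [List.concat_eq_append] at hs ⊢
    have hlast_le : ∀ y ∈ init ++ [plast], y.2 ≤ plast.2 := by
      rcases List.pairwise_append.1 hs with ⟨_, _, h3⟩
      intro y hy
      rcases List.mem_append.1 hy with hy | hy
      · exact h3 y hy plast (by simp)
      · simp at hy; rw [hy]
    have hrM0 : rankM ((init ++ [plast]).map (·.2)) plast.2 = 0 := by
      unfold rankM
      rw [List.countP_eq_zero.2]
      · rfl
      · intro w hw
        rcases List.mem_map.1 ((PySem.Set.mem_ofList _ _).1 hw) with ⟨y, hy, rfl⟩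
        simp [not_lt.2 (hlast_le y hy)]
    have hrM0' : rankM (List.map (fun x => x.2) init ++ [plast.2]) plast.2 = 0 := by
      simpa using hrM0
    obtain ⟨q0, t, hdecomp⟩ : ∃ q0 t, init ++ [plast] = q0 :: t := by
      cases init with
      | nil => exact ⟨plast, [], rfl⟩
      | cons i0 it => exact ⟨i0, it ++ [plast], rfl⟩
    have hq0mem : q0 ∈ init ++ [plast] := by rw [hdecomp]; simp
    unfold assign_rel_pos
    have h1 : PySem.List.pyGet? ((init ++ [plast]).map (fun p => [-1, p.1, p.2])) 0
        = some [-1, q0.1, q0.2] := by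
      rw [hdecomp, show (0 : Int) = ((0 : Nat) : Int) by norm_num, PySem.List.pyGet?_natCast]
      rfl
    rw [h1]
    dsimp only
    rw [show PySem.List.pyGet? [-1, q0.1, q0.2] 0 = some (-1) from rfl]
    dsimp only
    rw [if_neg (by norm_num : ¬ ((-1 : Int) > 0)), if_pos (by norm_num : (-1 : Int) < 0)]
    have hlen : ((((init ++ [plast]).map (fun p => [-1, p.1, p.2])).length : Nat) : Int)
        = (init.length : Int) + 1 := by simp
    rw [hlen, show ((init.length : Int) + 1 - 1) = (init.length : Int) by ring,
      range_neg_split _ (by positivity), List.foldl_append]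
    -- main loop via loopM_struct
    have harr : (init ++ [plast]).map (fun p => [-1, p.1, p.2])
        = init.reverse.reverse.map (fun p => [-1, p.1, p.2]) ++ ([-1, plast.1, plast.2] :: []) := by
      simp
    have hrl : (init.length : Int) = ((init.reverse.length : Nat) : Int) := by simp
    rw [harr, hrl, loopM_struct init.reverse [] (-1) plast.1 plast.2]
    -- scanM via scanM_spec
    have hpairM : (init.reverse.reverse.map (·.2) ++ plast.2 :: ([] : List Int)).Pairwise (· ≤ ·) := by
      simpa using List.pairwise_map.mpr hs
    have hspec := scanM_spec init.reverse [] plast.2 hpairM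
    have hVS : init.reverse.reverse.map (·.2) ++ plast.2 :: ([] : List Int)
        = (init ++ [plast]).map (·.2) := by simp
    rw [hVS] at hspec
    rw [hrM0] at hspec
    rw [show (-1 : Int) - 0 = -1 from by ring] at hspec
    rw [hspec]
    have hS : ((init.reverse.map (fun p =>
          [-1 - rankM ((init ++ [plast]).map (·.2)) p.2, p.1, p.2])).reverse
        ++ ([-1, plast.1, plast.2] :: []))
        = (init ++ [plast]).map (fun p => [-1 - rankM ((init ++ [plast]).map (·.2)) p.2, p.1, p.2]) := by
      rw [List.map_reverse, List.reverse_reverse, List.map_append]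
      simp [hrM0']
    rw [hS]
    -- the final index-0 step is the identity
    set G : (Int × Int) → List Int :=
      fun p => [-1 - rankM ((init ++ [plast]).map (·.2)) p.2, p.1, p.2] with hG
    have hGlast : G plast = [-1, plast.1, plast.2] := by simp [hG, hrM0']
    have hgetlast : ((init ++ [plast]).map G).getLast (by simp) = G plast := by
      rw [List.getLast_map]
      congr 1
      exact List.getLast_concat
    simp only [List.foldl_cons, List.foldl_nil]
    unfold arnStep
    dsimp only
    rw [show ((0 : Int) - 1) = -1 by ring, PySem.List.pyGetD_neg_one _ _ (by simp), hgetlast, hGlast]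
    have hc : PySem.List.pyGetD ((init ++ [plast]).map G) 0 [] = G q0 := by
      rw [hdecomp, List.map_cons, PySem.List.pyGetD_zero_cons]
    rw [hc]
    have e1 : PySem.List.pyGetD [-1, plast.1, plast.2] 2 0 = plast.2 := rfl
    have e2 : PySem.List.pyGetD (G q0) 2 0 = q0.2 := rfl
    have e3 : PySem.List.pyGetD (G q0) 0 0 = -1 - rankM ((init ++ [plast]).map (·.2)) q0.2 := rfl
    rw [e1, e2, e3]
    rw [if_neg (by have := hlast_le q0 hq0mem; omega)]
    split_ifs with h2'
    · -- plast.2 = q0.2 : the write re-writes the last element with its current value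
      have hval : (-1 : Int) - rankM ((init ++ [plast]).map (·.2)) q0.2 = -1 := by
        rw [← h2', hrM0]; ring
      rw [hval]
      have hmap : (init ++ [plast]).map G = init.map G ++ [[-1, plast.1, plast.2]] := by
        rw [List.map_append]; simp [hGlast]
      rw [hmap, show PySem.List.pySetD [-1, plast.1, plast.2] 0 (-1 : Int)
          = [-1, plast.1, plast.2] from rfl, pySetD_concat_neg_one]
    · rfl

-- ===== VERDICT (by name: the statement is the Claim_ definition above) =====
theorem create_relative_position_spec : Claim_equal_create_relative_position := by
  intro array c _
  unfold Spec_create_relative_position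
  unfold create_relative_position create_relative_position_alt
  dsimp only
  have hpart := foldl_idx (fun (acc : List (List Int) × List (List Int) × List (List Int)) (i v : Int) =>
      if v > c then (acc.1 ++ [[1, i, v]], acc.2.1, acc.2.2)
      else if v < c then (acc.1, acc.2.1 ++ [[-1, i, v]], acc.2.2)
      else (acc.1, acc.2.1, acc.2.2 ++ [[0, i, v]])) array array.length 0 ([], [], []) (by omega)
  rw [Nat.cast_zero, List.drop_zero] at hpart
  rw [hpart, part_split]
  dsimp only
  simp only [List.nil_append]
  rw [sorted_map (fun p => ([1, p.1, p.2] : List Int)) (fun x => PySem.List.pyGetD x 2 0)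
      (fun p => p.2) (fun a => rfl)
      ((PySem.List.enumerate array 0).filter (fun p => decide (c < p.2))),
    sorted_map (fun p => ([-1, p.1, p.2] : List Int)) (fun x => PySem.List.pyGetD x 2 0)
      (fun p => p.2) (fun a => rfl)
      ((PySem.List.enumerate array 0).filter (fun p => decide (p.2 < c)))]
  rw [plus_side _ (PySem.List.sorted_pairwise _ _), minus_side _ (PySem.List.sorted_pairwise _ _)]
  refine congrArg₂ (· ++ ·) (congrArg₂ (· ++ ·) ?_ rfl) ?_
  · exact List.map_congr_left (fun p hp => by rw [← alt_rankM _ _ (List.mem_map_of_mem hp)])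
  · exact List.map_congr_left (fun p hp => by rw [← alt_rankP _ _ (List.mem_map_of_mem hp)])
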